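-- pv_equiv track=rewrite | github.com/facmartoni/python_exercises | uri/2140.py | change_is_possible
-- ===== SOURCE A (Python) =====
-- def change_is_possible(buy_price, paid_price):
--     bills = [100, 50, 20, 10, 5, 2]
--     difference = paid_price - buy_price
--     count = 0
--
--     for bill in bills:
--         if(difference >= bill):
--             difference -= bill
--             count += 1
--         if(count > 2):
--             return False
--
--     if(difference == 0 and count == 2):
--         return True
--
--     return False
-- ===== SOURCE B (Python) =====
-- def change_is_possible(buy_price, paid_price):
--     bills = [100, 50, 20, 10, 5, 2]
--     difference = paid_price - buy_price
--     for i in range(len(bills)):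
--         for j in range(i + 1, len(bills)):
--             if bills[i] + bills[j] == difference:
--                 return True
--     return False
-- ===== Notes on version B (the rewrite author's own statement) =====
-- stated objective: alternative
-- what changed: Replaced the descending greedy subtraction with a mutable (difference,count) state by a direct search over all unordered pairs of distinct denominations, returning True iff some pair sums to the difference.
import Mathlib
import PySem

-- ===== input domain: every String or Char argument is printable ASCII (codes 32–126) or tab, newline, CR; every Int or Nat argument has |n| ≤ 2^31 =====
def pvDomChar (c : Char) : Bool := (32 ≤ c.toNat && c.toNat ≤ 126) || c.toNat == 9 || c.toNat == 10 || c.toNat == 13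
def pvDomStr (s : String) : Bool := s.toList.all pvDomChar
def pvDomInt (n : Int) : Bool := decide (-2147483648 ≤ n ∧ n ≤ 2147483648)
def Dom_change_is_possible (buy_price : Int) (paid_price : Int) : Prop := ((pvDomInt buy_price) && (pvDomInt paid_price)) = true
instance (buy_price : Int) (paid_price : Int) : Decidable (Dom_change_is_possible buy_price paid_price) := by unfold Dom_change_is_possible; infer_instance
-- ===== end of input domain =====

-- B replaces A's descending greedy subtraction with mutable (difference, count) state by a
-- direct search over all unordered pairs of distinct denominations (alternative, same cost).

-- ===== PORT A =====
-- A's for-loop over the bills, carrying (difference, count), with the early 'return False'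
def change_is_possible_go : List Int → Int → Int → Bool
  | [], difference, count => difference == 0 && count == 2
  | bill :: rest, difference, count =>
    if difference ≥ bill then
      (if count + 1 > 2 then false
       else change_is_possible_go rest (difference - bill) (count + 1))
    else
      (if count > 2 then false
       else change_is_possible_go rest difference count)

def change_is_possible (buy_price : Int) (paid_price : Int) : Bool :=
  let bills : List Int := [100, 50, 20, 10, 5, 2]
  let difference := paid_price - buy_price
  change_is_possible_go bills difference 0

-- ===== PORT B =====
-- Source B: for i in range(6): for j in range(i+1, 6): if bills[i] + bills[j] == difference: return True
def change_is_possible_alt (buy_price : Int) (paid_price : Int) : Bool :=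
  let bills : List Int := [100, 50, 20, 10, 5, 2]
  let difference := paid_price - buy_price
  (PySem.List.pyRange 0 6 1).any (fun i =>
    (PySem.List.pyRange (i + 1) 6 1).any (fun j =>
      (PySem.List.pyGet? bills i).getD 0 + (PySem.List.pyGet? bills j).getD 0 == difference))

-- ===== PRECONDITION & SPEC =====
def Spec_change_is_possible (buy_price : Int) (paid_price : Int) (out : Bool) : Prop := out = change_is_possible_alt buy_price paid_price
instance (buy_price : Int) (paid_price : Int) (out : Bool) : Decidable (Spec_change_is_possible buy_price paid_price out) := by unfold Spec_change_is_possible; infer_instance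

-- ===== CLAIM (what is proved, stated in full; the proofs are below) =====
def Claim_equal_change_is_possible : Prop := ∀ (buy_price : Int) (paid_price : Int), Dom_change_is_possible buy_price paid_price → Spec_change_is_possible buy_price paid_price (change_is_possible buy_price paid_price)

-- ===== LEMMAS AND PROOFS =====
-- B's pair search says: the difference is one of the 15 sums of two distinct bills.
set_option maxHeartbeats 1000000 in
theorem change_is_possible_alt_eval (d : Int) :
    ((PySem.List.pyRange 0 6 1).any (fun i =>
      (PySem.List.pyRange (i + 1) 6 1).any (fun j =>
        (PySem.List.pyGet? [(100:Int), 50, 20, 10, 5, 2] i).getD 0 +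
        (PySem.List.pyGet? [(100:Int), 50, 20, 10, 5, 2] j).getD 0 == d)))
    = (d == 150 || d == 120 || d == 110 || d == 105 || d == 102 ||
       d == 70 || d == 60 || d == 55 || d == 52 ||
       d == 30 || d == 25 || d == 22 || d == 15 || d == 12 || d == 7) := by
  norm_num [PySem.List.pyRange, PySem.List.pyGet?, PySem.List.pyIdx?,
    show ((6:Int).toNat = 6) from rfl, show ((5:Int).toNat = 5) from rfl,
    show ((4:Int).toNat = 4) from rfl, show ((3:Int).toNat = 3) from rfl,
    show ((2:Int).toNat = 2) from rfl, show ((1:Int).toNat = 1) from rfl,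
    List.range_succ, List.any_append, List.any_cons, Function.comp]
  rw [Bool.eq_iff_iff]; simp only [Bool.or_eq_true, beq_iff_eq]; omega

-- A's greedy says exactly the same: case analysis on the branches, each closed by omega.
set_option maxHeartbeats 2000000 in
theorem change_is_possible_go_eval (d : Int) :
    change_is_possible_go [100, 50, 20, 10, 5, 2] d 0
    = (d == 150 || d == 120 || d == 110 || d == 105 || d == 102 ||
       d == 70 || d == 60 || d == 55 || d == 52 ||
       d == 30 || d == 25 || d == 22 || d == 15 || d == 12 || d == 7) := by
  simp only [change_is_possible_go]
  norm_num
  rw [Bool.eq_iff_iff]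
  split_ifs <;>
    simp only [Bool.or_eq_true, Bool.and_eq_true, beq_iff_eq,
      Bool.not_eq_true', decide_eq_false_iff_not] <;> omega

-- ===== VERDICT (by name: the statement is the Claim_ definition above) =====
theorem change_is_possible_spec : Claim_equal_change_is_possible := by
  intro buy paid _
  unfold Spec_change_is_possible change_is_possible change_is_possible_alt
  rw [change_is_possible_go_eval, change_is_possible_alt_eval]
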